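-- pv_equiv track=rewrite | github.com/jiadongzh/iacos | utilx/functionx.py | accumulate_char_offset
-- ===== SOURCE A (Python) =====
-- def accumulate_char_offset(words, add_between_space=0):
--     r"""
--     Accumulate the char offset of words with the given space between words.
--     :param words:
--     :param add_between_space:
--     :return: the offset list for each word, and each offset is a tuple (included, excluded)
--     """
--     offsets = []
--     cur_offset = 0
--     for word in words:
--         end_offset = cur_offset+len(word)
--         offsets.append((cur_offset, end_offset))
--         cur_offset = end_offset + add_between_space
--     return offsets
-- ===== SOURCE B (Python) =====
-- def accumulate_char_offset(words, add_between_space=0):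
--     ws = list(words)
--     if len(ws) <= 1:
--         return [(0, len(w)) for w in ws]
--     mid = len(ws) // 2
--     left = accumulate_char_offset(ws[:mid], add_between_space)
--     right = accumulate_char_offset(ws[mid:], add_between_space)
--     shift = left[-1][1] + add_between_space
--     return left + [(s + shift, e + shift) for (s, e) in right]
-- ===== Notes on version B (the rewrite author's own statement) =====
-- stated objective: alternative
-- what changed: Replaces the imperative running-offset loop by divide and conquer: each half's offsets are computed independently starting at 0 and the right half's sub-result is shifted by the left half's last end offset plus the gap, so no cumulative counter is threaded through a traversal.
import Mathlib
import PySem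

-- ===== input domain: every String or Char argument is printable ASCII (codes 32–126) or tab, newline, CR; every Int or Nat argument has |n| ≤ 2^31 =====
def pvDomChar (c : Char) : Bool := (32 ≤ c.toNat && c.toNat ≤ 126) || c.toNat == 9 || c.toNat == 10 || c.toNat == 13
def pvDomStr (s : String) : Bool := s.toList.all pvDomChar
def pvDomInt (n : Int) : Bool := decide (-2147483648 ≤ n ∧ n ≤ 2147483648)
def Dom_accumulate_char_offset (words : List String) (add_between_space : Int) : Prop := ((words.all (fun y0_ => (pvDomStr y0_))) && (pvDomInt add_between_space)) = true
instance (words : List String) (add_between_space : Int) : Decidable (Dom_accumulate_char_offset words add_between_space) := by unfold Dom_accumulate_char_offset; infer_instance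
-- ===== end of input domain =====

-- B replaces the running-counter loop by divide and conquer: each half's offsets are computed from 0 and the right half is shifted (alternative decomposition).
-- ===== PORT A =====
def accumulate_char_offset (words : List String) (add_between_space : Int) : List (Int × Int) :=
  (words.foldl
    (fun (st : List (Int × Int) × Int) word =>
      let end_offset : Int := st.2 + PySem.Str.len word
      (st.1 ++ [(st.2, end_offset)], end_offset + add_between_space))
    ([], 0)).1

-- ===== PORT B =====
-- literal port of Source B's divide and conquer; in the `shift` match the `none` branch
-- is unreachable (mid ≥ 1 so `left` is nonempty), it only makes Python's left[-1] total.
def accumulate_char_offset_alt (words : List String) (add_between_space : Int) : List (Int × Int) :=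
  if _h : words.length ≤ 1 then
    words.map (fun w => ((0 : Int), PySem.Str.len w))
  else
    let mid := words.length / 2
    let left := accumulate_char_offset_alt (words.take mid) add_between_space
    let right := accumulate_char_offset_alt (words.drop mid) add_between_space
    let shift := (match left.getLast? with | some p => p.2 + add_between_space | none => 0)
    left ++ right.map (fun p => (p.1 + shift, p.2 + shift))
termination_by words.length
decreasing_by
  · simp only [List.length_take]; omega
  · simp only [List.length_drop]; omega

-- ===== PRECONDITION & SPEC =====
def Spec_accumulate_char_offset (words : List String) (add_between_space : Int) (out : List (Int × Int)) : Prop := out = accumulate_char_offset_alt words add_between_space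
instance (words : List String) (add_between_space : Int) (out : List (Int × Int)) : Decidable (Spec_accumulate_char_offset words add_between_space out) := by unfold Spec_accumulate_char_offset; infer_instance

-- ===== CLAIM (what is proved, stated in full; the proofs are below) =====
def Claim_equal_accumulate_char_offset : Prop := ∀ (words : List String) (add_between_space : Int), Dom_accumulate_char_offset words add_between_space → Spec_accumulate_char_offset words add_between_space (accumulate_char_offset words add_between_space)

-- ===== LEMMAS AND PROOFS =====
-- reference form of A: the pairs emitted from a given running offset
def pvGo (add : Int) : List Int → Int → List (Int × Int)
  | [], _ => []
  | l :: ls, c => (c, c + l) :: pvGo add ls (c + l + add)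

theorem pvA_eq (add : Int) (ws : List String) :
    ∀ (acc : List (Int × Int)) (c : Int),
      (ws.foldl
        (fun (st : List (Int × Int) × Int) word =>
          let e : Int := st.2 + PySem.Str.len word
          (st.1 ++ [(st.2, e)], e + add)) (acc, c)).1
      = acc ++ pvGo add (ws.map (fun w => PySem.Str.len w)) c := by
  induction ws with
  | nil => intro acc c; simp [pvGo]
  | cons w ws ih =>
      intro acc c
      simp only [List.foldl_cons, List.map_cons, pvGo]
      rw [ih]
      simp

theorem pvGo_shift (add : Int) (ls : List Int) :
    ∀ c : Int, pvGo add ls c = (pvGo add ls 0).map (fun p => (p.1 + c, p.2 + c)) := by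
  induction ls with
  | nil => intro c; simp [pvGo]
  | cons l ls ih =>
      intro c
      simp only [pvGo, List.map_cons]
      refine List.cons_eq_cons.mpr ⟨?_, ?_⟩
      · simp [Prod.ext_iff]; omega
      · rw [ih (c + l + add), ih (0 + l + add), List.map_map]
        congr 1
        funext p
        simp only [Function.comp, Prod.ext_iff]
        constructor <;> omega

theorem pvGo_append (add : Int) (l1 l2 : List Int) :
    ∀ c : Int, pvGo add (l1 ++ l2) c
      = pvGo add l1 c ++ pvGo add l2 (c + l1.sum + (l1.length : Int) * add) := by
  induction l1 with
  | nil => intro c; simp [pvGo]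
  | cons l l1 ih =>
      intro c
      simp only [List.cons_append, pvGo, List.length_cons, List.sum_cons]
      rw [ih (c + l + add)]
      have h2 : c + l + add + l1.sum + (l1.length : Int) * add
          = c + (l + l1.sum) + ((l1.length + 1 : ℕ) : Int) * add := by push_cast; ring
      rw [h2]

theorem pvGo_last (add : Int) (ls : List Int) :
    ∀ c : Int, ls ≠ [] →
      ∃ s, (pvGo add ls c).getLast? = some (s, c + ls.sum + ((ls.length : Int) - 1) * add) := by
  induction ls with
  | nil => intro c h; exact absurd rfl h
  | cons l ls ih =>
      intro c _
      cases ls with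
      | nil => exact ⟨c, by simp [pvGo]⟩
      | cons x xs =>
          obtain ⟨s, hs⟩ := ih (c + l + add) (by simp)
          refine ⟨s, ?_⟩
          have hdrop : ((c, c + l) :: pvGo add (x :: xs) (c + l + add)).getLast?
              = (pvGo add (x :: xs) (c + l + add)).getLast? := by
            rw [pvGo]
            exact List.getLast?_cons_cons
          rw [pvGo, hdrop, hs]
          simp only [List.length_cons, List.sum_cons]
          congr 2
          push_cast
          ring

theorem pvAlt_eq (add : Int) :
    ∀ (n : ℕ) (ws : List String), ws.length ≤ n →
      accumulate_char_offset_alt ws add = pvGo add (ws.map (fun w => PySem.Str.len w)) 0 := by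
  intro n
  induction n with
  | zero =>
      intro ws h
      have : ws = [] := List.eq_nil_of_length_eq_zero (Nat.le_zero.mp h)
      subst this
      simp [accumulate_char_offset_alt, pvGo]
  | succ n ih =>
      intro ws hlen
      by_cases h : ws.length ≤ 1
      · match ws with
        | [] => simp [accumulate_char_offset_alt, pvGo]
        | [w] => simp [accumulate_char_offset_alt, pvGo]
        | _ :: _ :: _ => simp at h
      · have hstep : accumulate_char_offset_alt ws add
            = accumulate_char_offset_alt (ws.take (ws.length / 2)) add
              ++ (accumulate_char_offset_alt (ws.drop (ws.length / 2)) add).map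
                  (fun p =>
                    (p.1 + (match (accumulate_char_offset_alt (ws.take (ws.length / 2)) add).getLast? with
                            | some q => q.2 + add | none => 0),
                     p.2 + (match (accumulate_char_offset_alt (ws.take (ws.length / 2)) add).getLast? with
                            | some q => q.2 + add | none => 0))) := by
          rw [accumulate_char_offset_alt, dif_neg h]
        rw [hstep]
        have hmid1 : 1 ≤ ws.length / 2 := by omega
        have hmidlt : ws.length / 2 < ws.length := by omega
        rw [ih (ws.take (ws.length / 2)) (by simp; omega),
            ih (ws.drop (ws.length / 2)) (by simp; omega)]
        have hsplit : ws.map (fun w => PySem.Str.len w)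
            = (ws.take (ws.length / 2)).map (fun w => PySem.Str.len w)
              ++ (ws.drop (ws.length / 2)).map (fun w => PySem.Str.len w) := by
          rw [← List.map_append, List.take_append_drop]
        rw [hsplit, pvGo_append]
        have hne : (ws.take (ws.length / 2)).map (fun w => PySem.Str.len w) ≠ [] := by
          apply List.ne_nil_of_length_pos
          simp
          omega
        obtain ⟨s, hs⟩ := pvGo_last add ((ws.take (ws.length / 2)).map (fun w => PySem.Str.len w)) 0 hne
        rw [hs]
        simp only []
        congr 1
        rw [pvGo_shift add _ (0 + ((ws.take (ws.length / 2)).map (fun w => PySem.Str.len w)).sum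
              + (((ws.take (ws.length / 2)).map (fun w => PySem.Str.len w)).length : Int) * add)]
        congr 1
        funext p
        simp only [Prod.ext_iff]
        constructor <;> ring

-- ===== VERDICT (by name: the statement is the Claim_ definition above) =====
theorem accumulate_char_offset_spec : Claim_equal_accumulate_char_offset := by
  intro words add _
  unfold Spec_accumulate_char_offset accumulate_char_offset
  rw [pvA_eq, pvAlt_eq add words.length words le_rfl]
  simp
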